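-- pv_equiv track=rewrite | github.com/Kandil7/AI-Mastery-2026 | sprints/rag_engine/rag-engine-mini/src/application/services/input_sanitizer.py | sanitize_url_param
-- ===== SOURCE A (Python) =====
-- def sanitize_url_param(url: str) -> str:
--     """
--     Sanitize URL parameter to prevent open redirect.
--
--     Removes dangerous URL protocols (javascript:, data:).
--     Validates URL format.
--
--     Args:
--         url: URL parameter
--
--     Returns:
--         Sanitized URL string
--
--     Examples:
--     - Input: `javascript:alert(document.cookie)`
--       Output: ``
--     - Input: `data:text/html,<script>alert(1)</script>`
--       Output: ``
--     """
--     # Block dangerous protocols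
--     dangerous_protocols = [
--         "javascript:",
--         "data:",
--         "vbscript:",
--         "file:",
--         "about:",
--         "mailto:",
--         "tel:",
--     ]
--
--     for protocol in dangerous_protocols:
--         if url.lower().startswith(protocol):
--             return ""
--
--     # Allow only http/https URLs
--     if not url.lower().startswith(("http://", "https://")):
--         # If it's not http/https, it might be unsafe
--         return ""
--
--     return url
-- ===== SOURCE B (Python) =====
-- def sanitize_url_param(url: str) -> str:
--     """Whitelist-only: keep url iff it starts with http:// or https:// (case-insensitive)."""
--     low = url.lower()
--     return url if low.startswith(("http://", "https://")) else ""
-- ===== Notes on version B (the rewrite author's own statement) =====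
-- stated objective: simpler
-- what changed: B drops the seven-protocol blacklist loop entirely: since every blocked protocol fails the http/https whitelist anyway, a single case-insensitive prefix test on the whitelist decides the result.
import Mathlib
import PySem

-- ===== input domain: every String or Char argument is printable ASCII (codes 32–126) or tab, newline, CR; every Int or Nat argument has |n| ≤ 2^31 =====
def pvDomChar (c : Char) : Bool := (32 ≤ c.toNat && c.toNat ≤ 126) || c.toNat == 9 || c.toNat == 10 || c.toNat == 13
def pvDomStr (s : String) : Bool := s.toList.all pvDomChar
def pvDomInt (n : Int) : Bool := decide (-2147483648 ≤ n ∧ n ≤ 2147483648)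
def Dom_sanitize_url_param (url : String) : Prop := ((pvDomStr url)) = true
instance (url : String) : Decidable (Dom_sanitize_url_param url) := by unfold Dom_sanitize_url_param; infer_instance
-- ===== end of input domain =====

-- B removes A's seven-protocol blacklist loop: only the http/https whitelist test decides the result (objective: simpler).

-- ===== PORT A =====
-- the 'for protocol in dangerous_protocols: if url.lower().startswith(protocol): return ""' loop
def pvLoopA (url : String) : List String → Option String
  | [] => none
  | p :: ps =>
    if PySem.Str.startswith (PySem.Str.lower url) p then some "" else pvLoopA url ps

def sanitize_url_param (url : String) : String :=
  let dangerous_protocols : List String :=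
    ["javascript:", "data:", "vbscript:", "file:", "about:", "mailto:", "tel:"]
  match pvLoopA url dangerous_protocols with
  | some r => r
  | none =>
    if !(PySem.Str.startswith (PySem.Str.lower url) "http://"
         || PySem.Str.startswith (PySem.Str.lower url) "https://") then ""
    else url

-- ===== PORT B =====
def sanitize_url_param_alt (url : String) : String :=
  let low := PySem.Str.lower url
  if PySem.Str.startswith low "http://" || PySem.Str.startswith low "https://" then url else ""

-- ===== PRECONDITION & SPEC =====
def Spec_sanitize_url_param (url : String) (out : String) : Prop := out = sanitize_url_param_alt url
instance (url : String) (out : String) : Decidable (Spec_sanitize_url_param url out) := by unfold Spec_sanitize_url_param; infer_instance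

-- ===== CLAIM (what is proved, stated in full; the proofs are below) =====
def Claim_equal_sanitize_url_param : Prop := ∀ (url : String), Dom_sanitize_url_param url → Spec_sanitize_url_param url (sanitize_url_param url)

-- ===== LEMMAS AND PROOFS =====

-- two prefixes of the same list starting with different characters cannot both hold
theorem pv_clash (l p q : List Char) (a b : Char) (hab : a ≠ b)
    (hpa : p.head? = some a) (hqb : q.head? = some b)
    (hp : PySem.Chars.startswith l p = true) : PySem.Chars.startswith l q = false := by
  rw [PySem.Chars.startswith_iff] at hp
  rw [Bool.eq_false_iff]
  intro hq
  rw [PySem.Chars.startswith_iff] at hq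
  cases p with
  | nil => simp at hpa
  | cons x xs =>
    cases q with
    | nil => simp at hqb
    | cons y ys =>
      cases l with
      | nil => simp [List.prefix_nil] at hp
      | cons c cs =>
        rw [List.cons_prefix_cons] at hp hq
        simp only [List.head?_cons, Option.some.injEq] at hpa hqb
        exact hab (by rw [← hpa, ← hqb, hp.1, hq.1])

-- ===== VERDICT (by name: the statement is the Claim_ definition above) =====
theorem sanitize_url_param_spec : Claim_equal_sanitize_url_param := by
  intro url _
  unfold Spec_sanitize_url_param sanitize_url_param sanitize_url_param_alt
  simp only [pvLoopA, PySem.Str.startswith_eq, PySem.Str.toList_lower]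
  by_cases hw : PySem.Chars.startswith (PySem.Chars.lower url.toList) "http://".toList = true
      ∨ PySem.Chars.startswith (PySem.Chars.lower url.toList) "https://".toList = true
  · have hbl : ∀ q : List Char, ∀ b : Char, b ≠ 'h' → q.head? = some b →
        PySem.Chars.startswith (PySem.Chars.lower url.toList) q = false := by
      intro q b hb hqb
      rcases hw with hw | hw
      · exact pv_clash _ _ q 'h' b (fun e => hb e.symm) (by decide) hqb hw
      · exact pv_clash _ _ q 'h' b (fun e => hb e.symm) (by decide) hqb hw
    have h1 := hbl "javascript:".toList 'j' (by decide) (by decide)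
    have h2 := hbl "data:".toList 'd' (by decide) (by decide)
    have h3 := hbl "vbscript:".toList 'v' (by decide) (by decide)
    have h4 := hbl "file:".toList 'f' (by decide) (by decide)
    have h5 := hbl "about:".toList 'a' (by decide) (by decide)
    have h6 := hbl "mailto:".toList 'm' (by decide) (by decide)
    have h7 := hbl "tel:".toList 't' (by decide) (by decide)
    simp only [h1, h2, h3, h4, h5, h6, h7, Bool.false_eq_true, if_false]
    rcases hw with hw | hw <;> simp_all
  · rw [not_or, Bool.not_eq_true, Bool.not_eq_true] at hw
    obtain ⟨w1, w2⟩ := hw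
    simp only [w1, w2, Bool.false_eq_true, if_false, Bool.or_false, Bool.not_false, if_true]
    split
    · next heq => split_ifs at heq <;> simp_all
    · rfl
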